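-- pv_equiv track=rewrite | github.com/joshanashakya/dissertation | workspace/dataset/java-python/GeeksForGeeks/5198/A/2.py | XorSum
-- ===== SOURCE A (Python) =====
-- def XorSum(arr, n) :
--
--     # store result
--     result = 0
--
--     # Traverse array element and
--     # apply XOR operation on it
--     for i in range(0, n) :
--
--         # XOR of current element
--         # with itself according to
--         # value.
--         k = 0
--         for j in range(1, arr[i]+1) :
--             k = k ^ arr[i]
--
--         result = result + k
--
--     return result
-- ===== SOURCE B (Python) =====
-- def XorSum(arr, n):
--     # x xor-ed with itself x times is x when x is positive and odd, else 0
--     return sum(x for x in arr[:max(n, 0)] if x > 0 and x % 2 == 1)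
-- ===== Notes on version B (the rewrite author's own statement) =====
-- stated objective: faster
-- what changed: Replaced A's inner loop that XORs arr[i] with itself arr[i] times by the closed form 'x if x > 0 and x is odd else 0' and summed it over the first max(n,0) elements in a single comprehension.
import Mathlib
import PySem

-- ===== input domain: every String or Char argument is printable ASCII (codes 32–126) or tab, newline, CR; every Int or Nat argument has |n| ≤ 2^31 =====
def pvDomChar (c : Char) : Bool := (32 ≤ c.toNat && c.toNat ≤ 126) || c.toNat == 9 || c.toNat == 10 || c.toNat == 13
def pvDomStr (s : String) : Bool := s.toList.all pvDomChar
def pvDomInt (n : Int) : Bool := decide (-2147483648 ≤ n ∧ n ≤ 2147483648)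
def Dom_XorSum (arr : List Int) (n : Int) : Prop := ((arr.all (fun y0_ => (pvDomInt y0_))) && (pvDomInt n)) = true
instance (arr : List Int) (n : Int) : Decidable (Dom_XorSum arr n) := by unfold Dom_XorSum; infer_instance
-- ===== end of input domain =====

-- B replaces A's inner xor loop by the closed form 'x if x > 0 and x odd else 0',
-- summed over the first max(n,0) elements in one pass (objective: faster).

-- ===== PORT A =====
def XorSum (arr : List Int) (n : Int) : Int :=
  (PySem.List.pyRange 0 n 1).foldl (fun result i =>
    let v := PySem.List.pyGetD arr i 0   -- arr[i]; total form, in range under Pre_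
    let k := (PySem.List.pyRange 1 (v + 1) 1).foldl (fun k _ => PySem.Int.bxor k v) 0
    result + k) 0

-- ===== PORT B =====
def pvKeep (x : Int) : Bool := decide (0 < x) && (PySem.Int.mod x 2 == 1)

def XorSum_alt (arr : List Int) (n : Int) : Int :=
  ((PySem.List.slice arr none (some (max n 0))).filter pvKeep).sum

-- ===== PRECONDITION & SPEC =====
-- A indexes arr[i] for every i in range(n): n > len(arr) would raise IndexError, so it is excluded.
def Pre_XorSum (arr : List Int) (n : Int) : Prop := n ≤ arr.length
instance (arr : List Int) (n : Int) : Decidable (Pre_XorSum arr n) := by unfold Pre_XorSum; infer_instance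
def pvWitness_XorSum : List Int × Int := ([3, 4, 7], 3)
def Spec_XorSum (arr : List Int) (n : Int) (out : Int) : Prop := out = XorSum_alt arr n
instance (arr : List Int) (n : Int) (out : Int) : Decidable (Spec_XorSum arr n out) := by unfold Spec_XorSum; infer_instance

-- ===== CLAIM (what is proved, stated in full; the proofs are below) =====
def Claim_equal_XorSum : Prop := ∀ (arr : List Int) (n : Int), Dom_XorSum arr n → Pre_XorSum arr n → Spec_XorSum arr n (XorSum arr n)

-- ===== LEMMAS AND PROOFS =====

-- xor-ing v into an accumulator once per element flips between 0 and v with the parity of the length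
theorem xorFold_parity (v : Int) (l : List Int) :
    l.foldl (fun k _ => PySem.Int.bxor k v) 0 = (if l.length % 2 = 0 then 0 else v)
    ∧ l.foldl (fun k _ => PySem.Int.bxor k v) v = (if l.length % 2 = 0 then v else 0) := by
  induction l with
  | nil => simp
  | cons a t ih =>
      obtain ⟨ih0, ihv⟩ := ih
      have hx0 : PySem.Int.bxor 0 v = v := by
        rw [PySem.Int.bxor_comm]; exact PySem.Int.bxor_zero v
      have hxv : PySem.Int.bxor v v = 0 := PySem.Int.bxor_self v
      constructor
      · rw [List.foldl_cons, hx0, ihv]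
        simp only [List.length_cons]
        split_ifs <;> omega
      · rw [List.foldl_cons, hxv, ih0]
        simp only [List.length_cons]
        split_ifs <;> omega

-- A's inner loop computes the closed form B sums
theorem inner_eq (v : Int) :
    (PySem.List.pyRange 1 (v + 1) 1).foldl (fun k _ => PySem.Int.bxor k v) 0
      = if pvKeep v then v else 0 := by
  have hlen : (PySem.List.pyRange 1 (v + 1) 1).length = (v + 1 - 1).toNat :=
    PySem.List.length_pyRange_one 1 (v + 1)
  have := (xorFold_parity v (PySem.List.pyRange 1 (v + 1) 1)).1
  rw [this, hlen]
  by_cases hv : 0 < v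
  · have hm : PySem.Int.mod v 2 = v % 2 := PySem.Int.mod_eq_emod_of_pos (by omega)
    simp only [pvKeep, hm]
    by_cases hodd : v % 2 = 1
    · simp [hodd]; omega
    · simp [hodd]; omega
  · have h0 : (v + 1 - 1).toNat = 0 := by omega
    simp only [h0, pvKeep]
    simp [hv]

-- filtering equals summing an if-then-else map
theorem filter_sum_eq (p : Int → Bool) (l : List Int) :
    (l.filter p).sum = (l.map (fun x => if p x then x else 0)).sum := by
  induction l with
  | nil => rfl
  | cons a t ih => by_cases h : p a <;> simp [h, ih]

-- the outer accumulation over range(n) equals the sum over the prefix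
theorem outer_sum (f : Int → Int) (arr : List Int) (m : Nat) (hm : m ≤ arr.length) :
    (PySem.List.pyRange 0 (m : Int) 1).foldl (fun r i => r + f (PySem.List.pyGetD arr i 0)) 0
      = ((arr.take m).map f).sum := by
  induction m with
  | zero => simp [PySem.List.pyRange_one_eq_nil]
  | succ m ih =>
      have hstep : PySem.List.pyRange 0 ((m : Int) + 1) 1
          = PySem.List.pyRange 0 (m : Int) 1 ++ [(m : Int)] :=
        PySem.List.pyRange_one_succ_right (by positivity)
      have hlt : m < arr.length := by omega
      have hget : PySem.List.pyGetD arr (m : Int) 0 = arr.getD m 0 :=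
        PySem.List.pyGetD_natCast arr m 0
      have htake : arr.take (m + 1) = arr.take m ++ [arr[m]] := by
        rw [List.take_succ]
        simp [List.getElem?_eq_getElem hlt]
      push_cast
      rw [hstep, List.foldl_append, ih (by omega), htake]
      simp only [List.foldl_cons, List.foldl_nil, List.map_append, List.map_cons,
        List.map_nil, List.sum_append, List.sum_cons, List.sum_nil, hget]
      rw [List.getD_eq_getElem?_getD, List.getElem?_eq_getElem hlt]
      simp

-- ===== VERDICT (by name: the statement is the Claim_ definition above) =====
theorem XorSum_spec : Claim_equal_XorSum := by
  intro arr n _ hpre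
  unfold Spec_XorSum XorSum XorSum_alt
  by_cases hn : n ≤ 0
  · have h1 : PySem.List.pyRange 0 n 1 = [] := PySem.List.pyRange_one_eq_nil (by omega)
    have h2 : max n 0 = (0 : Int) := by omega
    rw [h1, h2,
      show PySem.List.slice arr none (some (0:Int)) = arr.take ((0:Int)).toNat from
        PySem.List.slice_to arr (le_refl 0)]
    simp
  · have h2 : max n 0 = n := by omega
    have hn' : n = (n.toNat : Int) := by omega
    rw [h2, hn', PySem.List.slice_to_natCast, filter_sum_eq pvKeep]
    simp only [inner_eq]
    exact outer_sum (fun x => if pvKeep x then x else 0) arr n.toNat (by unfold Pre_XorSum at hpre; omega)
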